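-- pv_equiv track=rewrite | github.com/Jasmetk0/fax | msa/services/seed_anchors.py | _band_ranges
-- ===== SOURCE A (Python) =====
-- def _band_ranges(n: int) -> list[tuple[str, int, int]]:
--     """Generate band labels and start/end seed numbers."""
--     ranges: list[tuple[str, int, int]] = []
--     start = 1
--     prev_size = 1
--     while start <= n:
--         size = 1 if start <= 2 else prev_size * 2
--         end = min(n, start + size - 1)
--         label = str(start) if start == end else f"{start}-{end}"
--         ranges.append((label, start, end))
--         prev_size = size
--         start = end + 1
--     return ranges
-- ===== SOURCE B (Python) =====
-- def _band_ranges(n: int) -> list[tuple[str, int, int]]: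
--     """Generate band labels and start/end seed numbers.
--
--     Two staged passes: first build the list of band boundary points
--     (each next boundary is 2*b - 1), then pair consecutive boundaries
--     and format each (start, next_boundary) pair into a band.
--     """
--     bounds = [1, 2, 3]
--     while bounds[-1] <= n:
--         bounds.append(2 * bounds[-1] - 1)
--     out: list[tuple[str, int, int]] = []
--     for s, t in zip(bounds, bounds[1:]):
--         if s > n:
--             break
--         e = min(n, t - 1)
--         out.append((str(s) if s == e else f"{s}-{e}", s, e))
--     return out
-- ===== Notes on version B (the rewrite author's own statement) =====
-- stated objective: alternative
-- what changed: B works in two staged passes: it first materialises the list of band boundary points via the recurrence b' = 2*b - 1, then zips consecutive boundaries and formats each (start, next_boundary) pair into a band, instead of A's single loop threading running start/prev_size state.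
import Mathlib
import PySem

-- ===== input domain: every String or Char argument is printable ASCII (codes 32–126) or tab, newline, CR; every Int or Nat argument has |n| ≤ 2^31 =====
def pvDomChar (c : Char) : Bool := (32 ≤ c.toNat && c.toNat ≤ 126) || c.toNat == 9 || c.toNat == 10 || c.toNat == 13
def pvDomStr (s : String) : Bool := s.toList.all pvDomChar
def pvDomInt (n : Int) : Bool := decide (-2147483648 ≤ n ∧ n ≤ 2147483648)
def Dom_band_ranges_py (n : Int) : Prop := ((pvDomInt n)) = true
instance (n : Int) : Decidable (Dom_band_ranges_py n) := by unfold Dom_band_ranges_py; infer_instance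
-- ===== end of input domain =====

-- B replaces A's single stateful loop by two staged passes (boundary list, then zip-pairing); alternative decomposition, same cost.

-- ===== PORT A =====
-- A's while loop; the Nat fuel is only a totality guard: start grows by at least 1 per
-- iteration, so fuel (n+1).toNat is never exhausted before the loop condition fails.
def pvALoop (n : Int) : Nat → Int → Int → List (String × Int × Int) → List (String × Int × Int)
  | 0, _, _, acc => acc
  | f + 1, start, prev, acc =>
    if start ≤ n then
      let size : Int := if start ≤ 2 then 1 else prev * 2
      let e : Int := min n (start + size - 1)
      let label : String :=
        if start = e then PySem.Int.toStr start
        else PySem.Int.toStr start ++ "-" ++ PySem.Int.toStr e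
      pvALoop n f (e + 1) size (acc ++ [(label, start, e)])
    else acc

def band_ranges_py (n : Int) : List (String × Int × Int) := pvALoop n (n + 1).toNat 1 1 []

-- ===== PORT B =====
-- Stage 1 of Source B: pvGen is the boundary chain from b on, grown while the last boundary ≤ n
-- (each next boundary is 2*b - 1); the fuel is only a totality guard, never exhausted.
def pvGen (n : Int) : Nat → Int → List Int
  | 0, b => [b]
  | f + 1, b => if b ≤ n then b :: pvGen n f (2 * b - 1) else [b]

def pvBounds (n : Int) : List Int := 1 :: 2 :: pvGen n (n + 1).toNat 3

-- Stage 2 of Source B: emit a band per consecutive boundary pair, stopping once start > n.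
def pvEmit (n : Int) : List (Int × Int) → List (String × Int × Int)
  | [] => []
  | (s, t) :: rest =>
    if s > n then []
    else
      let e : Int := min n (t - 1)
      let label : String :=
        if s = e then PySem.Int.toStr s
        else PySem.Int.toStr s ++ "-" ++ PySem.Int.toStr e
      (label, s, e) :: pvEmit n rest

def band_ranges_py_alt (n : Int) : List (String × Int × Int) :=
  pvEmit n ((pvBounds n).zip (pvBounds n).tail)

-- ===== PRECONDITION & SPEC =====
def Spec_band_ranges_py (n : Int) (out : List (String × Int × Int)) : Prop := out = band_ranges_py_alt n
instance (n : Int) (out : List (String × Int × Int)) : Decidable (Spec_band_ranges_py n out) := by unfold Spec_band_ranges_py; infer_instance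

-- ===== CLAIM =====
def Claim_equal_band_ranges_py : Prop := ∀ (n : Int), Dom_band_ranges_py n → Spec_band_ranges_py n (band_ranges_py n)

-- ===== LEMMAS AND PROOFS =====

def pvZP (l : List Int) : List (Int × Int) := l.zip l.tail

theorem pvZP_cons2 (a b : Int) (l : List Int) :
    pvZP (a :: b :: l) = (a, b) :: pvZP (b :: l) := by
  simp [pvZP, List.zip]

theorem pvGen_cons_ex (n : Int) (g : Nat) (b : Int) :
    ∃ r, pvGen n g b = b :: r := by
  cases g with
  | zero => exact ⟨[], rfl⟩
  | succ f =>
    by_cases h : b ≤ n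
    · exact ⟨pvGen n f (2 * b - 1), by simp [pvGen, h]⟩
    · exact ⟨[], by simp [pvGen, h]⟩

theorem pvGen_stop (n : Int) (g : Nat) (b : Int) (h : ¬ b ≤ n) :
    pvGen n g b = [b] := by
  cases g with
  | zero => rfl
  | succ f => simp [pvGen, h]

theorem pvZP_cons_gen (n : Int) (x : Int) (g : Nat) (b : Int) :
    pvZP (x :: pvGen n g b) = (x, b) :: pvZP (pvGen n g b) := by
  obtain ⟨r, hr⟩ := pvGen_cons_ex n g b
  rw [hr, pvZP_cons2]

theorem pvALoop_stop (n : Int) (f : Nat) (s p : Int) (acc : List (String × Int × Int))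
    (h : ¬ s ≤ n) : pvALoop n f s p acc = acc := by
  cases f with
  | zero => rfl
  | succ f => simp [pvALoop, h]

-- Core: A's loop at state (b, p) with b = 2p+1 ≥ 3 and adequate fuel equals B's
-- emission over the boundary chain from b (with adequate fuel).
theorem pvLoop_emit (n : Int) : ∀ (f : Nat) (g : Nat) (b p : Int), 3 ≤ b → 1 ≤ p →
    b = 2 * p + 1 → (n + 1 - b).toNat ≤ f → (n + 1 - b).toNat ≤ g →
    ∀ (acc : List (String × Int × Int)),
    pvALoop n f b p acc = acc ++ pvEmit n (pvZP (pvGen n g b)) := by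
  intro f
  induction f with
  | zero =>
    intro g b p hb hp hinv hf hg acc
    have hle : ¬ b ≤ n := by omega
    rw [pvALoop_stop n 0 b p acc hle, pvGen_stop n g b hle]
    simp [pvZP, pvEmit]
  | succ f ih =>
    intro g b p hb hp hinv hf hg acc
    by_cases hle : b ≤ n
    · obtain ⟨g', hg'⟩ : ∃ g', g = g' + 1 := ⟨g - 1, by omega⟩
      subst hg'
      simp only [pvALoop, pvGen, if_pos hle, pvZP_cons_gen]
      have hsz : (if b ≤ 2 then (1:Int) else p * 2) = p * 2 := by rw [if_neg (by omega)]
      simp only [hsz, pvEmit, if_neg (by omega : ¬ b > n)]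
      have hemin : min n (b + p * 2 - 1) = min n (2 * b - 1 - 1) := by omega
      rw [hemin]
      set e : Int := min n (2 * b - 1 - 1) with he
      set lb : String := if b = e then PySem.Int.toStr b else PySem.Int.toStr b ++ "-" ++ PySem.Int.toStr e with hlb
      by_cases hcap : 2 * b - 2 ≤ n
      · -- uncapped: A continues at (2b-1, 2p), matching the chain's next pair
        have he1 : e + 1 = 2 * b - 1 := by omega
        rw [he1, ih g' (2 * b - 1) (p * 2) (by omega) (by omega) (by omega)
          (by omega) (by omega) (acc ++ [(lb, b, e)])]
        simp
      · -- capped: e = n; both sides stop after this band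
        rw [pvALoop_stop n f (e + 1) (p * 2) _ (by omega),
          pvGen_stop n g' (2 * b - 1) (by omega)]
        simp [pvZP, pvEmit]
    · rw [pvALoop_stop n (f + 1) b p acc hle, pvGen_stop n g b hle]
      simp [pvZP, pvEmit]

-- ===== VERDICT =====
theorem band_ranges_py_spec : Claim_equal_band_ranges_py := by
  intro n _
  unfold Spec_band_ranges_py band_ranges_py band_ranges_py_alt pvBounds
  simp only [List.tail_cons]
  rw [show ((1:Int) :: 2 :: pvGen n (n + 1).toNat 3).zip
        ((2:Int) :: pvGen n (n + 1).toNat 3) = pvZP ((1:Int) :: 2 :: pvGen n (n + 1).toNat 3) from rfl,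
    pvZP_cons2, pvZP_cons_gen]
  by_cases h1 : (1:Int) ≤ n
  · obtain ⟨f, hf⟩ : ∃ f, (n + 1).toNat = f + 1 := ⟨(n + 1).toNat - 1, by omega⟩
    rw [hf]
    simp only [pvALoop, if_pos h1, if_pos (show (1:Int) ≤ 2 by norm_num)]
    rw [show (1:Int) + 1 - 1 = 1 from by norm_num, min_eq_right h1]
    simp only [pvEmit, if_neg (by omega : ¬ (1:Int) > n)]
    rw [show min n ((2:Int) - 1) = 1 from by omega]
    by_cases h2 : (2:Int) ≤ n
    · obtain ⟨f', hf'⟩ : ∃ f', f = f' + 1 := ⟨f - 1, by omega⟩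
      rw [show (1:Int) + 1 = 2 from by norm_num, hf']
      simp only [pvALoop, if_pos h2, if_pos (show (2:Int) ≤ 2 by norm_num)]
      rw [show (2:Int) + 1 - 1 = 2 from by norm_num, min_eq_right h2]
      simp only [if_neg (by omega : ¬ (2:Int) > n)]
      rw [show min n ((3:Int) - 1) = 2 from by omega]
      rw [show (2:Int) + 1 = 3 from by norm_num,
        pvLoop_emit n f' (f' + 1 + 1) 3 1 (by norm_num) (by norm_num) (by norm_num)
          (by omega) (by omega)]
      simp
    · rw [show (1:Int) + 1 = 2 from by norm_num, pvALoop_stop n f 2 1 _ h2]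
      simp [show (2:Int) > n from by omega]
  · rw [pvALoop_stop n (n + 1).toNat 1 1 [] h1]
    simp [pvEmit, show (1:Int) > n from by omega]
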